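-- pv_equiv track=rewrite | github.com/seun-beta/openapi-specs-1 | fix_api operationIds.py | generate
-- ===== SOURCE A (Python) =====
-- def camelCase(words):
--     for i,word in enumerate(words):
--         if not word:
--             continue
--         word = list(word)
--         word[0] = word[0].upper()
--         words[i] = "".join(word)
--     return "".join(words)
--
-- def generate(path):
--     words=[]
--     for word in path.split("/")[1:]:
--         word =  word.lower()
--         word =  word.replace("{","")
--         word =  word.replace("}","")
--         if word:
--             if "-" in word:
--                 word =  camelCase(word.split("-"))
--             if "_" in word:
--                 word =  camelCase(word.split("_"))
--             words.append(word)
--     return camelCase(words)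
-- ===== SOURCE B (Python) =====
-- def generate(path):
--     # Single left-to-right character scan instead of nested split/camelCase passes.
--     i = path.find("/")
--     if i == -1:
--         return ""
--     out = []
--     up = True
--     for ch in path[i + 1:]:
--         if ch in "/-_":
--             up = True
--         elif ch in "{}":
--             pass
--         else:
--             c = ch.lower()
--             out.append(c.upper() if up else c)
--             up = False
--     return "".join(out)
-- ===== Notes on version B (the rewrite author's own statement) =====
-- stated objective: simpler
-- what changed: A splits each segment on dashes and then on underscores with a list-mutating camelCase helper applied up to three times per segment; B is a single left-to-right character scan with a capitalize-next flag that lowercases, drops braces, and capitalizes the first letter after any separator.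
import Mathlib
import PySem

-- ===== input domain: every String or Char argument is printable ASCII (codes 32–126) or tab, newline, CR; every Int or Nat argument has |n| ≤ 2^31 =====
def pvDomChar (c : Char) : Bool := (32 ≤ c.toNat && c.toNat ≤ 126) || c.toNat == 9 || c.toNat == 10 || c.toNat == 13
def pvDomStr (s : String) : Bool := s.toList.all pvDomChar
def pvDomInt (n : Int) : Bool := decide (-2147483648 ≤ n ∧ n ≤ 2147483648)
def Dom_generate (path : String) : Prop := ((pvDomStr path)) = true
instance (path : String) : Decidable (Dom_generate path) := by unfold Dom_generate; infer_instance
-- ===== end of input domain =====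

-- B replaces A's nested split/camelCase passes by one left-to-right character scan (objective: simpler).

-- ===== PORT A =====
-- `word = list(word); word[0] = word[0].upper(); "".join(word)` on a nonempty word
def capWordA (w : List Char) : List Char :=
  match w with
  | [] => []
  | c :: cs => PySem.Chars.upperChar c :: cs

-- camelCase(words): `enumerate` reads each index before the loop body overwrites it,
-- so the fold over the original list with an in-place set is exact
def camelCaseA (words : List (List Char)) : List Char :=
  let ws := (PySem.List.enumerate words).foldl
    (fun ws iw => if iw.2 = ([] : List Char) then ws else PySem.List.pySetD ws iw.1 (capWordA iw.2))
    words
  PySem.Chars.join [] ws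

def generate (path : String) : String :=
  let segs := PySem.List.slice (PySem.Chars.splitOn path.toList ['/']) (some 1) none
  let words := segs.foldl (fun words word =>
    let word := PySem.Chars.lower word
    let word := PySem.Chars.replace word ['{'] []
    let word := PySem.Chars.replace word ['}'] []
    if word ≠ [] then
      let word := if PySem.Chars.isIn ['-'] word then camelCaseA (PySem.Chars.splitOn word ['-']) else word
      let word := if PySem.Chars.isIn ['_'] word then camelCaseA (PySem.Chars.splitOn word ['_']) else word
      words ++ [word]
    else words) []
  String.ofList (camelCaseA words)

-- ===== PORT B =====
def generate_alt (path : String) : String :=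
  let i := PySem.Chars.find path.toList ['/']
  if i = -1 then ""
  else
    let rest := PySem.List.slice path.toList (some (i + 1)) none
    let st := rest.foldl
      (fun (st : List Char × Bool) ch =>
        if ch = '/' ∨ ch = '-' ∨ ch = '_' then (st.1, true)
        else if ch = '{' ∨ ch = '}' then st
        else
          let c := PySem.Chars.lowerChar ch
          (st.1 ++ [if st.2 then PySem.Chars.upperChar c else c], false))
      ([], true)
    String.ofList st.1

-- ===== PRECONDITION & SPEC =====
def Spec_generate (path : String) (out : String) : Prop := out = generate_alt path
instance (path : String) (out : String) : Decidable (Spec_generate path out) := by unfold Spec_generate; infer_instance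

-- ===== CLAIM (what is proved, stated in full; the proofs are below) =====
def Claim_equal_generate : Prop := ∀ (path : String), Dom_generate path → Spec_generate path (generate path)

-- ===== LEMMAS AND PROOFS =====

theorem char_le_iff (a c : Char) : a ≤ c ↔ a.toNat ≤ c.toNat := by
  rw [Char.le_def, UInt32.le_iff_toNat_le]; rfl

theorem char_eq_iff (a c : Char) : a = c ↔ a.toNat = c.toNat := by
  constructor
  · intro h; rw [h]
  · intro h; exact Char.ext (UInt32.toNat_inj.mp h)

theorem toNat_ofNat_small (n : Nat) (h : n < 55296) : (Char.ofNat n).toNat = n := by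
  rw [Char.toNat_ofNat]; simp only [Nat.isValidChar]; split_ifs with h2
  · rfl
  · omega

theorem upperChar_toNat (c : Char) :
    (PySem.Chars.upperChar c).toNat = if 97 ≤ c.toNat ∧ c.toNat ≤ 122 then c.toNat - 32 else c.toNat := by
  simp only [PySem.Chars.upperChar, PySem.Chars.islower, char_le_iff, Bool.and_eq_true, decide_eq_true_eq]
  have ha : 'a'.toNat = 97 := rfl
  have hz : 'z'.toNat = 122 := rfl
  have hA : 'A'.toNat = 65 := rfl
  have hZ : 'Z'.toNat = 90 := rfl
  split_ifs with h1 h2 h3 <;> first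
    | rfl
    | (rw [toNat_ofNat_small] <;> omega)
    | omega

theorem lowerChar_toNat (c : Char) :
    (PySem.Chars.lowerChar c).toNat = if 65 ≤ c.toNat ∧ c.toNat ≤ 90 then c.toNat + 32 else c.toNat := by
  simp only [PySem.Chars.lowerChar, PySem.Chars.isupper, char_le_iff, Bool.and_eq_true, decide_eq_true_eq]
  have ha : 'a'.toNat = 97 := rfl
  have hz : 'z'.toNat = 122 := rfl
  have hA : 'A'.toNat = 65 := rfl
  have hZ : 'Z'.toNat = 90 := rfl
  split_ifs with h1 h2 h3 <;> first
    | rfl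
    | (rw [toNat_ofNat_small] <;> omega)
    | omega

theorem upperChar_idem (c : Char) : PySem.Chars.upperChar (PySem.Chars.upperChar c) = PySem.Chars.upperChar c := by
  rw [char_eq_iff, upperChar_toNat, upperChar_toNat]
  split_ifs <;> omega

theorem upperChar_eq_iff (c t : Char) (h : ¬(65 ≤ t.toNat ∧ t.toNat ≤ 90)) (h' : ¬(97 ≤ t.toNat ∧ t.toNat ≤ 122)) :
    PySem.Chars.upperChar c = t ↔ c = t := by
  rw [char_eq_iff, char_eq_iff, upperChar_toNat]
  split_ifs with h1 <;> omega

theorem lowerChar_eq_iff (c t : Char) (h : ¬(65 ≤ t.toNat ∧ t.toNat ≤ 90)) (h' : ¬(97 ≤ t.toNat ∧ t.toNat ≤ 122)) :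
    PySem.Chars.lowerChar c = t ↔ c = t := by
  rw [char_eq_iff, char_eq_iff, lowerChar_toNat]
  split_ifs with h1 <;> omega

theorem splitOn_go_spec (d : Char) :
    ∀ (fuel : Nat) (l : List Char) (cur : List Char) (acc : List (List Char)), l.length < fuel →
      PySem.Chars.splitOn.go [d] fuel l cur acc =
        acc.reverse ++ (List.splitOnP (· = d) l).modifyHead (cur.reverse ++ ·) := by
  intro fuel
  induction fuel with
  | zero => intro l cur acc h; omega
  | succ n ih =>
    intro l cur acc h
    match l with
    | [] =>
      rw [PySem.Chars.splitOn.go]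
      simp [List.splitOnP_nil]
      omega
    | c :: rest =>
      have h' : rest.length < n := by
        simp only [List.length_cons] at h; omega
      rw [PySem.Chars.splitOn.go]
      have hp : [d].isPrefixOf (c :: rest) = (d == c) := by
        simp [List.isPrefixOf]
      rw [hp]
      by_cases hc : c = d
      · have hb : (d == c) = true := by simp [hc]
        rw [hb, if_pos rfl]
        have hd : List.drop [d].length (c :: rest) = rest := by simp
        rw [hd, ih rest [] (cur.reverse :: acc) h']
        rw [List.splitOnP_cons]
        simp [hc]
        cases List.splitOnP (fun x => decide (x = d)) rest <;> simp
      · have hb : (d == c) = false := by simp [beq_iff_eq]; exact fun he => hc he.symm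
        rw [hb]
        simp only [Bool.false_eq_true, if_false]
        rw [ih rest (c :: cur) acc h']
        rw [List.splitOnP_cons]
        simp only [hc, decide_false, Bool.false_eq_true, if_false, decide_eq_true_eq, if_neg]
        have hne := List.splitOnP_ne_nil (p := fun x => decide (x = d)) rest
        match hS : List.splitOnP (fun x => decide (x = d)) rest with
        | [] => exact absurd hS hne
        | h0 :: t => simp

theorem splitOn_singleton (s : List Char) (d : Char) :
    PySem.Chars.splitOn s [d] = List.splitOnP (· = d) s := by
  rw [PySem.Chars.splitOn]
  rw [splitOn_go_spec d (s.length + 1) s [] [] (by omega)]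
  simp
  cases List.splitOnP (fun x => decide (x = d)) s <;> simp

theorem replace_go_spec (b : Char) :
    ∀ (fuel : Nat) (l acc : List Char), l.length ≤ fuel →
      PySem.Chars.replace.go [b] [] fuel l acc =
        acc.reverse ++ l.filter (· ≠ b) := by
  intro fuel
  induction fuel with
  | zero =>
    intro l acc h
    match l with
    | [] => rw [PySem.Chars.replace.go]; simp
    | c :: rest => simp at h
  | succ n ih =>
    intro l acc h
    match l with
    | [] => rw [PySem.Chars.replace.go]; simp; omega
    | c :: rest =>
      have h' : rest.length ≤ n := by simp only [List.length_cons] at h; omega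
      rw [PySem.Chars.replace.go]
      have hp : [b].isPrefixOf (c :: rest) = (b == c) := by simp [List.isPrefixOf]
      rw [hp]
      by_cases hc : c = b
      · have hb : (b == c) = true := by simp [hc]
        rw [hb, if_pos rfl]
        have hd : List.drop [b].length (c :: rest) = rest := by simp
        rw [hd]
        have : List.reverse ([] : List Char) ++ acc = acc := by simp
        rw [this, ih rest acc h']
        simp [hc]
      · have hb : (b == c) = false := by simp [beq_iff_eq]; exact fun he => hc he.symm
        rw [hb]
        simp only [Bool.false_eq_true, if_false]
        rw [ih rest (c :: acc) h']
        simp [hc]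

theorem replace_singleton (s : List Char) (b : Char) :
    PySem.Chars.replace s [b] [] = s.filter (· ≠ b) := by
  rw [PySem.Chars.replace]
  simp only [List.isEmpty_cons, Bool.false_eq_true, if_false]
  exact replace_go_spec b s.length s [] (le_refl _)

theorem isIn_singleton (w : List Char) (d : Char) :
    PySem.Chars.isIn [d] w = true ↔ d ∈ w := by
  rw [PySem.Chars.isIn, bne_iff_ne, ne_eq, ← ne_eq, PySem.Chars.find_ne_neg_one_iff]
  constructor
  · intro hinf
    exact hinf.mem (by simp)
  · intro hm
    obtain ⟨l1, l2, rfl⟩ := List.mem_iff_append.mp hm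
    exact ⟨l1, l2, by simp⟩

theorem join_nil_flatten (parts : List (List Char)) :
    PySem.Chars.join [] parts = parts.flatten := by
  induction parts with
  | nil => simp [PySem.Chars.join_nil]
  | cons p rest ih =>
    match rest with
    | [] => simp [PySem.Chars.join_singleton]
    | q :: t =>
      rw [PySem.Chars.join_cons_cons, ih]
      simp




theorem camel_fold : ∀ (ws pre : List (List Char)),
    (PySem.List.enumerate ws (pre.length : Int)).foldl
      (fun acc iw => if iw.2 = ([] : List Char) then acc else PySem.List.pySetD acc iw.1 (capWordA iw.2))
      (pre ++ ws) = pre ++ ws.map capWordA := by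
  intro ws
  induction ws with
  | nil => intro pre; simp [PySem.List.enumerate_nil]
  | cons w ws' ih =>
    intro pre
    rw [PySem.List.enumerate_cons, List.foldl_cons]
    by_cases hw : w = ([] : List Char)
    · subst hw
      simp only [eq_self_iff_true, if_true]
      have h1 : pre ++ ([] : List Char) :: ws' = (pre ++ [([] : List Char)]) ++ ws' := by simp
      have h2 : ((pre.length : Int) + 1) = (((pre ++ [([] : List Char)]).length : Int)) := by simp
      rw [h1, h2, ih (pre ++ [([] : List Char)])]
      simp [capWordA]
    · simp only [hw, if_neg, not_false_iff]
      have hset : PySem.List.pySetD (pre ++ w :: ws') ((pre.length : Int)) (capWordA w)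
          = (pre ++ [capWordA w]) ++ ws' := by
        rw [PySem.List.pySetD_natCast, List.set_append]
        simp
      rw [hset]
      have h2 : ((pre.length : Int) + 1) = (((pre ++ [capWordA w]).length : Int)) := by simp
      rw [h2, ih (pre ++ [capWordA w])]
      simp

theorem camelCaseA_eq (words : List (List Char)) :
    camelCaseA words = (words.map capWordA).flatten := by
  unfold camelCaseA
  have := camel_fold words []
  simp only [List.length_nil, Nat.cast_zero, List.nil_append] at this
  rw [this, join_nil_flatten]


def e1 (d : Char) : Bool → List Char → List Char
  | _, [] => []
  | up, c :: cs =>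
    if c = d then e1 d true cs
    else (if up then PySem.Chars.upperChar c else c) :: e1 d false cs

-- two-delimiter emission pass on cleaned characters
def E2 : Bool → List Char → List Char
  | _, [] => []
  | up, c :: cs =>
    if c = '-' ∨ c = '_' then E2 true cs
    else (if up then PySem.Chars.upperChar c else c) :: E2 false cs

-- full per-character pass on raw characters (B's algorithm)
def E : Bool → List Char → List Char
  | _, [] => []
  | up, c :: cs =>
    if c = '/' ∨ c = '-' ∨ c = '_' then E true cs
    else if c = '{' ∨ c = '}' then E up cs
    else (if up then PySem.Chars.upperChar (PySem.Chars.lowerChar c) else PySem.Chars.lowerChar c) :: E false cs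




theorem camel_split_e1 (d : Char) (xs : List Char) :
    ((List.splitOnP (· = d) xs).map capWordA).flatten = e1 d true xs ∧
    ((List.splitOnP (· = d) xs).headD [] ++ (((List.splitOnP (· = d) xs).tail).map capWordA).flatten
      = e1 d false xs) := by
  induction xs with
  | nil => simp [List.splitOnP_nil, capWordA, e1]
  | cons c cs ih =>
    obtain ⟨ihP, ihQ⟩ := ih
    rw [List.splitOnP_cons]
    by_cases hc : c = d
    · simp only [hc, decide_true, if_true]
      constructor
      · simpa [capWordA, e1] using ihP
      · simpa [e1] using ihP
    · simp only [hc, decide_false, Bool.false_eq_true, if_false]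
      have hne := List.splitOnP_ne_nil (p := fun x => decide (x = d)) cs
      match hS : List.splitOnP (fun x => decide (x = d)) cs with
      | [] => exact absurd hS hne
      | h0 :: t =>
        rw [hS] at ihP ihQ
        simp only [List.headD_cons, List.tail_cons] at ihQ
        constructor
        · simp only [List.modifyHead, List.map_cons, List.flatten_cons, capWordA, e1, hc]
          simp only [if_neg hc, ← ihQ]
          simp
        · simp only [List.modifyHead, List.headD_cons, List.tail_cons, e1, if_neg hc]
          simp only [← ihQ]
          simp

theorem e1_no_delim (d : Char) (xs : List Char) (h : d ∉ xs) :
    e1 d false xs = xs ∧ e1 d true xs = capWordA xs := by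
  induction xs with
  | nil => simp [e1, capWordA]
  | cons c cs ih =>
    have hc : c ≠ d := fun he => h (he ▸ List.mem_cons_self)
    have ih' := ih (fun hm => h (List.mem_cons_of_mem _ hm))
    simp only [e1, if_neg hc, capWordA]
    exact ⟨by simp [ih'.1], by simp [ih'.1]⟩

theorem capWordA_e1 (d : Char) (xs : List Char) :
    capWordA (e1 d true xs) = e1 d true xs := by
  induction xs with
  | nil => simp [e1, capWordA]
  | cons c cs ih =>
    by_cases hc : c = d
    · simp only [e1, if_pos hc]; exact ih
    · simp [e1, if_neg hc, capWordA, upperChar_idem]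

-- M: the underscore pass after the dash pass is the combined pass
theorem e1_e1 (xs : List Char) : ∀ (u1 u2 : Bool),
    e1 '_' u2 (e1 '-' u1 xs) = E2 (u1 || u2) xs := by
  induction xs with
  | nil => intro u1 u2; simp [e1, E2]
  | cons c cs ih =>
    intro u1 u2
    by_cases hd : c = '-'
    · simp only [e1, if_pos hd, E2, hd, true_or, if_true, ih]
      simp
    · by_cases hu : c = '_'
      · subst hu
        have h1 : PySem.Chars.upperChar '_' = '_' := by decide
        cases u1 <;> simp [e1, E2, h1, hd, ih]
      · have hne : (if u1 then PySem.Chars.upperChar c else c) ≠ '_' := by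
          cases u1 <;> simp [upperChar_eq_iff, hu]
        have hor : ¬(c = '-' ∨ c = '_') := by tauto
        simp only [e1, if_neg hd, if_neg hne, E2, if_neg hor]
        rw [ih false false]
        cases u1 <;> cases u2 <;> simp [upperChar_idem]




def cleanW (w : List Char) : List Char :=
  ((PySem.Chars.lower w).filter (· ≠ '{')).filter (· ≠ '}')

theorem E_eq_E2_clean (w : List Char) (hs : '/' ∉ w) : ∀ up, E up w = E2 up (cleanW w) := by
  induction w with
  | nil => intro up; simp [E, cleanW, PySem.Chars.lower, E2]
  | cons c cs ih =>
    intro up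
    have hs' : '/' ∉ cs := fun hm => hs (List.mem_cons_of_mem _ hm)
    have ihs := ih hs'
    have hcs : c ≠ '/' := fun he => hs (he ▸ List.mem_cons_self)
    have hclean : cleanW (c :: cs) =
        (if (PySem.Chars.lowerChar c ≠ '{' ∧ PySem.Chars.lowerChar c ≠ '}')
         then PySem.Chars.lowerChar c :: cleanW cs else cleanW cs) := by
      simp only [cleanW, PySem.Chars.lower, List.map_cons, List.filter_cons]
      split_ifs with h1 h2 h3 h4 h5 <;> simp_all
    by_cases hbr : c = '{' ∨ c = '}'
    · have hl : PySem.Chars.lowerChar c = c := by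
        rcases hbr with h | h <;> subst h <;> decide
      have hnd : ¬(c = '/' ∨ c = '-' ∨ c = '_') := by
        rcases hbr with h | h <;> subst h <;> decide
      rw [hclean]
      simp only [E, if_neg hnd, if_pos hbr, hl]
      rw [if_neg (by tauto), ihs]
    · have hbr1 : c ≠ '{' := fun h => hbr (Or.inl h)
      have hbr2 : c ≠ '}' := fun h => hbr (Or.inr h)
      have hl1 : PySem.Chars.lowerChar c ≠ '{' := fun he =>
        hbr1 ((lowerChar_eq_iff c '{' (by decide) (by decide)).mp he)
      have hl2 : PySem.Chars.lowerChar c ≠ '}' := fun he =>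
        hbr2 ((lowerChar_eq_iff c '}' (by decide) (by decide)).mp he)
      rw [hclean, if_pos ⟨hl1, hl2⟩]
      by_cases hdel : c = '-' ∨ c = '_'
      · have hl : PySem.Chars.lowerChar c = c := by
          rcases hdel with h | h <;> subst h <;> decide
        have hE : c = '/' ∨ c = '-' ∨ c = '_' := Or.inr hdel
        simp only [E, if_pos hE, E2, hl, if_pos hdel, ihs]
      · have h1 : ¬(c = '/' ∨ c = '-' ∨ c = '_') := by tauto
        have hld : ¬(PySem.Chars.lowerChar c = '-' ∨ PySem.Chars.lowerChar c = '_') := by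
          rintro (he | he)
          · exact hdel (Or.inl ((lowerChar_eq_iff c '-' (by decide) (by decide)).mp he))
          · exact hdel (Or.inr ((lowerChar_eq_iff c '_' (by decide) (by decide)).mp he))
        simp only [E, if_neg h1, if_neg hbr, E2, if_neg hld, ihs]

theorem splitOnP_parts_clean {α : Type} (p : α → Bool) :
    ∀ (l : List α) (w : List α), w ∈ List.splitOnP p l → ∀ x ∈ w, ¬ p x = true := by
  intro l
  induction l with
  | nil => intro w hw; simp [List.splitOnP_nil] at hw; simp [hw]
  | cons c cs ih =>
    intro w hw
    rw [List.splitOnP_cons] at hw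
    by_cases hc : p c
    · rw [if_pos hc] at hw
      rcases List.mem_cons.mp hw with rfl | hw'
      · simp
      · exact ih w hw'
    · rw [if_neg hc] at hw
      have hne := List.splitOnP_ne_nil p cs
      match hS : List.splitOnP p cs with
      | [] => exact absurd hS hne
      | h0 :: t =>
        rw [hS] at hw
        simp only [List.modifyHead] at hw
        rcases List.mem_cons.mp hw with rfl | hw'
        · intro x hx
          rcases List.mem_cons.mp hx with rfl | hx'
          · exact hc
          · exact ih h0 (hS ▸ List.mem_cons_self) x hx'
        · exact ih w (hS ▸ List.mem_cons_of_mem _ hw')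

theorem splitOnP_clean_prefix {α : Type} (p : α → Bool) (c : α) (hc : p c) :
    ∀ (pre t : List α), (∀ x ∈ pre, ¬ p x = true) →
      List.splitOnP p (pre ++ c :: t) = pre :: List.splitOnP p t := by
  intro pre
  induction pre with
  | nil => intro t _; simp [List.splitOnP_cons, hc]
  | cons a pre' ih =>
    intro t hcl
    have ha : ¬ p a = true := hcl a List.mem_cons_self
    rw [List.cons_append, List.splitOnP_cons, if_neg ha,
        ih t (fun x hx => hcl x (List.mem_cons_of_mem _ hx))]
    simp [List.modifyHead]

theorem E_split_top : ∀ (t : List Char) (up : Bool),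
    E up ((List.splitOnP (· = '/') t).headD []) ++
      (((List.splitOnP (· = '/') t).tail).map (E true)).flatten = E up t := by
  intro t
  induction t with
  | nil => intro up; simp [List.splitOnP_nil, E]
  | cons c cs ih =>
    intro up
    have hne := List.splitOnP_ne_nil (p := fun x => decide (x = '/')) cs
    match hS : List.splitOnP (fun x => decide (x = '/')) cs with
    | [] => exact absurd hS hne
    | h0 :: t' =>
      have ihu : ∀ u, E u h0 ++ (t'.map (E true)).flatten = E u cs := by
        intro u
        have h := ih u
        rw [hS] at h
        simpa using h
      rw [List.splitOnP_cons, hS]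
      by_cases hc : c = '/'
      · simp only [hc, decide_true, if_true, List.headD_cons, List.tail_cons, List.map_cons,
          List.flatten_cons]
        have h1 : E up ([] : List Char) = [] := by simp [E]
        have h2 : E up ('/' :: cs) = E true cs := by simp [E]
        rw [h1, h2, List.nil_append, ihu true]
      · simp only [hc, decide_false, Bool.false_eq_true, if_false, List.modifyHead,
          List.headD_cons, List.tail_cons]
        by_cases hdu : c = '-' ∨ c = '_'
        · have h1 : c = '/' ∨ c = '-' ∨ c = '_' := Or.inr hdu
          simp only [E, if_pos h1]
          exact ihu true
        · by_cases hbr : c = '{' ∨ c = '}'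
          · have h1 : ¬(c = '/' ∨ c = '-' ∨ c = '_') := by tauto
            simp only [E, if_neg h1, if_pos hbr]
            exact ihu up
          · have h1 : ¬(c = '/' ∨ c = '-' ∨ c = '_') := by tauto
            simp only [E, if_neg h1, if_neg hbr, List.cons_append]
            rw [ihu false]

-- final flag of B's scan
def Fl : Bool → List Char → Bool
  | up, [] => up
  | up, c :: cs =>
    if c = '/' ∨ c = '-' ∨ c = '_' then Fl true cs
    else if c = '{' ∨ c = '}' then Fl up cs
    else Fl false cs

theorem foldB_spec : ∀ (cs : List Char) (out : List Char) (up : Bool),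
    cs.foldl
      (fun (st : List Char × Bool) ch =>
        if ch = '/' ∨ ch = '-' ∨ ch = '_' then (st.1, true)
        else if ch = '{' ∨ ch = '}' then st
        else
          let c := PySem.Chars.lowerChar ch
          (st.1 ++ [if st.2 then PySem.Chars.upperChar c else c], false))
      (out, up) = (out ++ E up cs, Fl up cs) := by
  intro cs
  induction cs with
  | nil => intro out up; simp [E, Fl]
  | cons c cs' ih =>
    intro out up
    rw [List.foldl_cons]
    by_cases h1 : c = '/' ∨ c = '-' ∨ c = '_'
    · simp only [if_pos h1, ih]
      simp [E, Fl, if_pos h1]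
    · by_cases h2 : c = '{' ∨ c = '}'
      · simp only [if_neg h1, if_pos h2, ih]
        simp [E, Fl, if_neg h1, if_pos h2]
      · simp only [if_neg h1, if_neg h2, ih]
        simp only [E, Fl, if_neg h1, if_neg h2]
        cases up <;> simp

-- the contribution of one segment of A's loop
theorem segment_contrib (w : List Char) :
    (if cleanW w ≠ [] then
        capWordA (
          (fun a => if PySem.Chars.isIn ['_'] a then camelCaseA (PySem.Chars.splitOn a ['_']) else a)
          ((fun b => if PySem.Chars.isIn ['-'] b then camelCaseA (PySem.Chars.splitOn b ['-']) else b)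
            (cleanW w)))
      else []) = E2 true (cleanW w) := by
  by_cases hnil : cleanW w = []
  · simp [hnil, E2]
  · rw [if_pos hnil]
    set w2 := cleanW w with hw2
    have hdash : ∃ u1, ((fun b => if PySem.Chars.isIn ['-'] b then camelCaseA (PySem.Chars.splitOn b ['-']) else b) w2)
        = e1 '-' u1 w2 := by
      by_cases hd : PySem.Chars.isIn ['-'] w2
      · refine ⟨true, ?_⟩
        simp only [if_pos hd]
        rw [splitOn_singleton, camelCaseA_eq]
        exact (camel_split_e1 '-' w2).1
      · refine ⟨false, ?_⟩
        simp only [if_neg hd]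
        have hnm : '-' ∉ w2 := fun hm => hd ((isIn_singleton w2 '-').mpr hm)
        exact ((e1_no_delim '-' w2 hnm).1).symm
    obtain ⟨u1, hu1⟩ := hdash
    rw [hu1]
    set a := e1 '-' u1 w2 with ha
    by_cases hu : PySem.Chars.isIn ['_'] a
    · simp only [if_pos hu]
      rw [splitOn_singleton, camelCaseA_eq, (camel_split_e1 '_' a).1, capWordA_e1, ha, e1_e1]
      simp
    · simp only [if_neg hu]
      have hnm : '_' ∉ a := fun hm => hu ((isIn_singleton a '_').mpr hm)
      rw [← (e1_no_delim '_' a hnm).2, ha, e1_e1]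
      simp

theorem flatten_map_filter {α : Type} (p : α → Prop) [DecidablePred p] (g : α → List Char) :
    ∀ (xs : List α), ((xs.filter (fun x => decide (p x))).map g).flatten
      = (xs.map (fun w => if p w then g w else [])).flatten := by
  intro xs
  induction xs with
  | nil => simp
  | cons x xs' ih =>
    by_cases hx : p x <;> simp [List.filter_cons, hx, ih]

-- A's accumulating loop is filter + map
theorem generate_words (segs : List (List Char)) :
    segs.foldl (fun words word =>
      let word := PySem.Chars.lower word
      let word := PySem.Chars.replace word ['{'] []
      let word := PySem.Chars.replace word ['}'] []
      if word ≠ [] then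
        let word := if PySem.Chars.isIn ['-'] word then camelCaseA (PySem.Chars.splitOn word ['-']) else word
        let word := if PySem.Chars.isIn ['_'] word then camelCaseA (PySem.Chars.splitOn word ['_']) else word
        words ++ [word]
      else words) []
    = (segs.filter (fun w => decide (cleanW w ≠ []))).map (fun w =>
        (fun a => if PySem.Chars.isIn ['_'] a then camelCaseA (PySem.Chars.splitOn a ['_']) else a)
        ((fun b => if PySem.Chars.isIn ['-'] b then camelCaseA (PySem.Chars.splitOn b ['-']) else b)
          (cleanW w))) := by
  suffices h : ∀ (init : List (List Char)),
      segs.foldl (fun words word =>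
        let word := PySem.Chars.lower word
        let word := PySem.Chars.replace word ['{'] []
        let word := PySem.Chars.replace word ['}'] []
        if word ≠ [] then
          let word := if PySem.Chars.isIn ['-'] word then camelCaseA (PySem.Chars.splitOn word ['-']) else word
          let word := if PySem.Chars.isIn ['_'] word then camelCaseA (PySem.Chars.splitOn word ['_']) else word
          words ++ [word]
        else words) init
      = init ++ (segs.filter (fun w => decide (cleanW w ≠ []))).map (fun w =>
          (fun a => if PySem.Chars.isIn ['_'] a then camelCaseA (PySem.Chars.splitOn a ['_']) else a)
          ((fun b => if PySem.Chars.isIn ['-'] b then camelCaseA (PySem.Chars.splitOn b ['-']) else b)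
            (cleanW w))) by
    simpa using h []
  induction segs with
  | nil => intro init; simp
  | cons s rest ih =>
    intro init
    rw [List.foldl_cons]
    have hcw : PySem.Chars.replace (PySem.Chars.replace (PySem.Chars.lower s) ['{'] []) ['}'] []
        = cleanW s := by
      rw [replace_singleton, replace_singleton]; rfl
    by_cases hnil : cleanW s = []
    · simp only [hcw, hnil, ne_eq, not_true_eq_false, if_false]
      rw [ih init]
      simp only [List.filter_cons, hnil, ne_eq, not_true_eq_false, decide_false,
        Bool.false_eq_true, if_false]
    · simp only [hcw, ne_eq, hnil, not_false_eq_true, if_true]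
      rw [ih]
      simp only [List.filter_cons, ne_eq, hnil, not_false_eq_true, decide_true, if_true,
        List.map_cons]
      simp

theorem flatten_E_split (t : List Char) :
    ((List.splitOnP (· = '/') t).map (E true)).flatten = E true t := by
  have h := E_split_top t true
  have hne := List.splitOnP_ne_nil (p := fun x => decide (x = '/')) t
  match hS : List.splitOnP (fun x => decide (x = '/')) t with
  | [] => exact absurd hS hne
  | h0 :: t' =>
    rw [hS] at h
    simpa using h

-- A's whole result over a list of '/'-free segments
theorem generate_core (segs : List (List Char)) (hseg : ∀ w ∈ segs, '/' ∉ w) :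
    (camelCaseA ((segs.filter (fun w => decide (cleanW w ≠ []))).map (fun w =>
        (fun a => if PySem.Chars.isIn ['_'] a then camelCaseA (PySem.Chars.splitOn a ['_']) else a)
        ((fun b => if PySem.Chars.isIn ['-'] b then camelCaseA (PySem.Chars.splitOn b ['-']) else b)
          (cleanW w)))))
    = (segs.map (E true)).flatten := by
  rw [camelCaseA_eq, List.map_map, flatten_map_filter]
  congr 1
  apply List.map_congr_left
  intro w hw
  have h1 := segment_contrib w
  rw [E_eq_E2_clean w (hseg w hw) true]
  simpa [Function.comp] using h1

theorem mem_take_ne_slash (L : List Char) (n : Nat)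
    (hmin : ∀ i < n, ¬ ['/'] <+: L.drop i) :
    ∀ x ∈ L.take n, ¬ decide (x = '/') = true := by
  intro x hx
  simp only [decide_eq_true_eq]
  intro hxe
  subst hxe
  obtain ⟨i, hi, hget⟩ := List.getElem_of_mem hx
  have hin : i < n := lt_of_lt_of_le hi (by simp [List.length_take])
  have hiL : i < L.length := by
    have := hi
    simp only [List.length_take] at this
    omega
  apply hmin i hin
  rw [List.drop_eq_getElem_cons hiL]
  have : L[i] = '/' := by
    rw [← List.getElem_take (xs := L) (h := hi)]
    exact hget
  rw [this]
  exact ⟨_, rfl⟩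

-- ===== VERDICT =====
theorem generate_spec : Claim_equal_generate := by
  intro path _dom
  unfold Spec_generate
  show generate path = generate_alt path
  unfold generate generate_alt
  by_cases hf : PySem.Chars.find path.toList ['/'] = -1
  · -- no slash: both empty
    have hnin : '/' ∉ path.toList := by
      intro hm
      have : (['/'] : List Char) <:+: path.toList := by
        obtain ⟨l1, l2, he⟩ := List.mem_iff_append.mp hm
        rw [he]
        exact ⟨l1, l2, by simp⟩
      exact (PySem.Chars.find_eq_neg_one_iff path.toList ['/']).mp hf this
    have hsplit : PySem.Chars.splitOn path.toList ['/'] = [path.toList] := by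
      rw [splitOn_singleton]
      exact List.splitOnP_eq_single _ _ (fun x hx => by
        simp only [decide_eq_true_eq]
        exact fun he => hnin (he ▸ hx))
    rw [hsplit, if_pos hf]
    simp only [PySem.List.slice_from_one, List.tail_cons, List.foldl_nil]
    rw [camelCaseA_eq]
    simp
  · -- slash at index k
    rw [if_neg hf]
    set k := PySem.Chars.find path.toList ['/'] with hk
    have hk0 : 0 ≤ k := by
      have := PySem.Chars.neg_one_le_find path.toList ['/']
      rw [← hk] at this
      omega
    obtain ⟨hpre, hmin⟩ := PySem.Chars.find_spec (s := path.toList) (sub := ['/']) (by omega)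
    set n := k.toNat with hn
    have hdropn : path.toList.drop n = '/' :: path.toList.drop (n + 1) := by
      obtain ⟨t, ht⟩ := hpre
      rw [← ht]
      have : path.toList.drop (n + 1) = (path.toList.drop n).tail := by
        rw [List.tail_drop]
      rw [this, ← ht]
      simp
    have hL : path.toList = path.toList.take n ++ '/' :: path.toList.drop (n + 1) := by
      rw [← hdropn, List.take_append_drop]
    have hsplit : PySem.Chars.splitOn path.toList ['/']
        = path.toList.take n :: List.splitOnP (· = '/') (path.toList.drop (n + 1)) := by
      rw [splitOn_singleton]
      conv_lhs => rw [hL]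
      exact splitOnP_clean_prefix _ '/' (by simp) _ _
        (mem_take_ne_slash path.toList n (fun i hi => hmin i hi))
    have hslice : PySem.List.slice path.toList (some (k + 1)) none
        = path.toList.drop (n + 1) := by
      rw [PySem.List.slice_from _ (by omega)]
      congr 1
      omega
    rw [hsplit, hslice]
    simp only [PySem.List.slice_from_one, List.tail_cons]
    rw [generate_words, generate_core _ (fun w hw hx => by
      have := splitOnP_parts_clean (fun x => decide (x = '/')) (path.toList.drop (n + 1)) w hw '/' hx
      simp at this)]
    rw [flatten_E_split]
    rw [foldB_spec]
    simp
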